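-- pv_equiv track=rewrite | github.com/LeeJaeYun7/samsung-algorithm | 4주차/스타트택시/이재윤.py | selectTaxi
-- ===== SOURCE A (Python) =====
-- def selectTaxi(distInfo):
--
--
--
--     minDist = int(1e9)
--
--     for i in range(len(distInfo)):
--         if distInfo[i][3] < minDist:
--             minDist = distInfo[i][3]
--
--
--
--     minDistTaxis = []
--
--     for i in range(len(distInfo)):
--         if distInfo[i][3] == minDist:
--             minDistTaxis.append(distInfo[i])
--
--
--     if len(minDistTaxis) == 1:
--         return minDistTaxis[0]
--
--
--     elif len(minDistTaxis) >= 2: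
--         minRowTaxis = []
--         minRow = int(1e9)
--
--         for i in range(len(minDistTaxis)):
--             if minDistTaxis[i][1] < minRow:
--                 minRow = minDistTaxis[i][1]
--
--
--         for i in range(len(minDistTaxis)):
--             if minRow == minDistTaxis[i][1]:
--                 minRowTaxis.append(minDistTaxis[i])
--
--
--
--         if len(minRowTaxis) == 1:
--             return minRowTaxis[0]
--
--
--         elif len(minRowTaxis) >= 2:
--             minColTaxi = []
--             minCol = int(1e9)
--
--             for i in range(len(minRowTaxis)):
--                 if minRowTaxis[i][2] < minCol:
--                     minCol = minRowTaxis[i][2]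
--
--
--             for i in range(len(minRowTaxis)):
--                 if minCol == minRowTaxis[i][2]:
--                     minColTaxi.append(minRowTaxis[i])
--
--
--
--             return minColTaxi[0]
-- ===== SOURCE B (Python) =====
-- def selectTaxi(distInfo):
--     return min(distInfo, key=lambda t: (t[3], t[1], t[2]))
-- ===== Notes on version B (the rewrite author's own statement) =====
-- stated objective: simpler
-- what changed: Replaced the three cascading minimize-then-filter stages (min distance, then min row among those, then min column) by a single-pass min with the composite key (t[3], t[1], t[2]), relying on tuple lexicographic comparison and min's first-wins tie-breaking.
-- outside the precondition, e.g. on selectTaxi([]): A returns None, B raises ValueError; on selectTaxi([[0, 0, 0, 1000000000]]): A returns [0, 0, 0, 1000000000], B returns [0, 0, 0, 1000000000]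
import Mathlib
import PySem

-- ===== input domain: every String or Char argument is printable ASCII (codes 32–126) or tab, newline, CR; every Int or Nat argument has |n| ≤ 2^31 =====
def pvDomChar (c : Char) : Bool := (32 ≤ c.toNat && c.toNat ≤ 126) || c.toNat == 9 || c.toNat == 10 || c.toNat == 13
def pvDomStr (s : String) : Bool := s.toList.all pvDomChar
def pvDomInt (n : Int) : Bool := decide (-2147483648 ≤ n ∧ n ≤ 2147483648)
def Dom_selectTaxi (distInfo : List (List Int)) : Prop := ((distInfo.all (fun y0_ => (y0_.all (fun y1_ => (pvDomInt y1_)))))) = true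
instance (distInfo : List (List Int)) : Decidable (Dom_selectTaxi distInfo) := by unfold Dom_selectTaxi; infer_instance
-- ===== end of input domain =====

-- B replaces A's three cascading minimize-then-filter stages by one single-pass min
-- with the composite key (t[3], t[1], t[2]) (objective: simpler).

-- ===== PORT A =====
def selectTaxi (distInfo : List (List Int)) : List Int :=
  let minDist := distInfo.foldl
    (fun m r => if PySem.List.pyGetD r 3 0 < m then PySem.List.pyGetD r 3 0 else m) 1000000000
  let minDistTaxis := distInfo.foldl
    (fun acc r => if PySem.List.pyGetD r 3 0 = minDist then acc ++ [r] else acc) []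
  if minDistTaxis.length = 1 then minDistTaxis.headD []
  else if 2 ≤ minDistTaxis.length then
    let minRow := minDistTaxis.foldl
      (fun m r => if PySem.List.pyGetD r 1 0 < m then PySem.List.pyGetD r 1 0 else m) 1000000000
    let minRowTaxis := minDistTaxis.foldl
      (fun acc r => if minRow = PySem.List.pyGetD r 1 0 then acc ++ [r] else acc) []
    if minRowTaxis.length = 1 then minRowTaxis.headD []
    else if 2 ≤ minRowTaxis.length then
      let minCol := minRowTaxis.foldl
        (fun m r => if PySem.List.pyGetD r 2 0 < m then PySem.List.pyGetD r 2 0 else m) 1000000000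
      let minColTaxi := minRowTaxis.foldl
        (fun acc r => if minCol = PySem.List.pyGetD r 2 0 then acc ++ [r] else acc) []
      minColTaxi.headD []
    else []  -- Python falls through and returns None here; unreachable under Pre_
  else []    -- Python falls through and returns None here; unreachable under Pre_

-- ===== PORT B =====
-- Python's '<' on 3-tuples of ints: lexicographic, written out (exact)
def pyTupleLt3 : (Int × Int × Int) → (Int × Int × Int) → Bool
  | (d1, r1, c1), (d2, r2, c2) =>
    d1 < d2 || (d1 == d2 && (r1 < r2 || (r1 == r2 && c1 < c2)))

-- the key lambda t: (t[3], t[1], t[2])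
def pyKey (t : List Int) : Int × Int × Int :=
  (PySem.List.pyGetD t 3 0, PySem.List.pyGetD t 1 0, PySem.List.pyGetD t 2 0)

-- min(distInfo, key=…), hand-ported: running minimum, replaced only on strict key '<'
-- (CPython's first-wins tie rule); min raises ValueError on [], which Pre_ excludes.
def selectTaxi_alt (distInfo : List (List Int)) : List Int :=
  match distInfo with
  | [] => []
  | x :: xs => xs.foldl (fun best r => if pyTupleLt3 (pyKey r) (pyKey best) then r else best) x

-- ===== PRECONDITION & SPEC =====
-- Pre_ excludes the empty list and rows shorter than 4 (A returns None or raises IndexError;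
-- B raises ValueError/IndexError), and rows whose row/column/distance entry reaches A's
-- sentinel 10^9, where A can return None or raise instead of a row (on the excluded inputs
-- where A does still return a row, it happens to agree with B).
def Pre_selectTaxi (distInfo : List (List Int)) : Prop :=
  distInfo ≠ [] ∧ ∀ r ∈ distInfo, 4 ≤ r.length ∧
    r.getD 1 0 < 1000000000 ∧ r.getD 2 0 < 1000000000 ∧ r.getD 3 0 < 1000000000
instance (distInfo : List (List Int)) : Decidable (Pre_selectTaxi distInfo) := by
  unfold Pre_selectTaxi; infer_instance

def pvWitness_selectTaxi : List (List Int) := [[1, 2, 3, 7], [4, 1, 2, 7], [5, 1, 9, 7]]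

def Spec_selectTaxi (distInfo : List (List Int)) (out : List Int) : Prop := out = selectTaxi_alt distInfo
instance (distInfo : List (List Int)) (out : List Int) : Decidable (Spec_selectTaxi distInfo out) := by
  unfold Spec_selectTaxi; infer_instance

-- ===== CLAIM (what is proved, stated in full; the proofs are below) =====
def Claim_equal_selectTaxi : Prop := ∀ (distInfo : List (List Int)), Dom_selectTaxi distInfo → Pre_selectTaxi distInfo → Spec_selectTaxi distInfo (selectTaxi distInfo)

-- ===== LEMMAS AND PROOFS =====

-- running minimum of k over a list (0 on [], irrelevant there); proof-side only
def pvMinOf {α : Type} (k : α → Int) : List α → Int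
  | [] => 0
  | x :: xs => xs.foldl (fun m r => min m (k r)) (k x)

theorem pvFoldlMin_le_init {α : Type} (k : α → Int) (t : List α) (i : Int) :
    t.foldl (fun m r => min m (k r)) i ≤ i := by
  induction t generalizing i with
  | nil => simp
  | cons r t ih => exact le_trans (ih _) (min_le_left _ _)

theorem pvFoldlMin_le {α : Type} (k : α → Int) (t : List α) (i : Int) (r : α) (h : r ∈ t) :
    t.foldl (fun m r => min m (k r)) i ≤ k r := by
  induction t generalizing i with
  | nil => simp at h
  | cons s t ih =>
    simp only [List.foldl_cons]
    rcases List.mem_cons.1 h with h | h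
    · subst h
      exact le_trans (pvFoldlMin_le_init _ _ _) (min_le_right _ _)
    · exact ih (min i (k s)) h

theorem pvMinOf_le {α : Type} (k : α → Int) (l : List α) (r : α) (h : r ∈ l) :
    pvMinOf k l ≤ k r := by
  match l with
  | x :: xs =>
    simp only [pvMinOf]
    rcases List.mem_cons.1 h with h | h
    · subst h; exact pvFoldlMin_le_init k xs (k r)
    · exact pvFoldlMin_le k xs (k x) r h

theorem pvMinOf_attained {α : Type} (k : α → Int) (x : α) (xs : List α) :
    ∃ r ∈ x :: xs, k r = pvMinOf k (x :: xs) := by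
  induction xs generalizing x with
  | nil => exact ⟨x, by simp [pvMinOf]⟩
  | cons s t ih =>
    have hM : pvMinOf k (x :: s :: t) = pvMinOf k ((if k s < k x then s else x) :: t) := by
      simp only [pvMinOf, List.foldl_cons]
      congr 1
      split <;> omega
    rcases ih (if k s < k x then s else x) with ⟨r, hr, hkr⟩
    refine ⟨r, ?_, by rw [hM]; exact hkr⟩
    rcases List.mem_cons.1 hr with h | h
    · split at h <;> subst h <;> simp
    · simp [h]

theorem pvMinOf_attained' {α : Type} (k : α → Int) (l : List α) (h : l ≠ []) :
    ∃ r ∈ l, k r = pvMinOf k l := by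
  match l with
  | x :: xs => exact pvMinOf_attained k x xs

-- CPython's min-with-key loop is the first element attaining the minimum of the key
theorem pvPick_head? {α : Type} (k : α → Int) (x : α) (xs : List α) :
    ((x :: xs).filter (fun r => decide (k r = pvMinOf k (x :: xs)))).head?
      = some (xs.foldl (fun b r => if k r < k b then r else b) x) := by
  induction xs generalizing x with
  | nil => simp [pvMinOf]
  | cons r t ih =>
    have hM : pvMinOf k (x :: r :: t) = pvMinOf k ((if k r < k x then r else x) :: t) := by
      simp only [pvMinOf, List.foldl_cons]
      congr 1
      split <;> omega
    have h1 := pvMinOf_le k (x :: r :: t) x (by simp)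
    have h2 := pvMinOf_le k (x :: r :: t) r (by simp)
    have hfold : (r :: t).foldl (fun b r => if k r < k b then r else b) x
        = t.foldl (fun b r => if k r < k b then r else b) (if k r < k x then r else x) := by
      simp [List.foldl_cons]
    rw [hfold, ← ih (if k r < k x then r else x), ← hM]
    by_cases hc : k r < k x
    · have hxne : ¬ (k x = pvMinOf k (x :: r :: t)) := by omega
      simp [List.filter_cons, hxne, hc]
    · simp only [if_neg hc]
      by_cases hrM : k r = pvMinOf k (x :: r :: t)
      · have hxM : k x = pvMinOf k (x :: r :: t) := by omega
        simp [List.filter_cons, hxM]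
      · simp [List.filter_cons, hrM]

-- entries of a row lie in the grader's domain bounds
def pvBnd (r : List Int) : Prop :=
  -2147483648 ≤ r.getD 1 0 ∧ r.getD 1 0 ≤ 2147483648 ∧
  -2147483648 ≤ r.getD 2 0 ∧ r.getD 2 0 ≤ 2147483648 ∧
  -2147483648 ≤ r.getD 3 0 ∧ r.getD 3 0 ≤ 2147483648

-- (dist, row, col) packed into one integer; lexicographic on pvBnd rows
def pvEnc (r : List Int) : Int :=
  r.getD 3 0 * 73786976294838206464 + r.getD 1 0 * 8589934592 + r.getD 2 0

theorem pvBnd_of_dom (l : List (List Int)) (hdom : Dom_selectTaxi l)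
    (r : List Int) (hr : r ∈ l) : pvBnd r := by
  unfold Dom_selectTaxi at hdom
  rw [List.all_eq_true] at hdom
  have hall := hdom r hr
  simp only [List.all_eq_true] at hall
  have hbnd : ∀ i : Nat, -2147483648 ≤ r.getD i 0 ∧ r.getD i 0 ≤ 2147483648 := by
    intro i
    rcases hv : r[i]? with _ | v
    · simp [List.getD, hv]
    · have hm : v ∈ r := List.mem_of_getElem? hv
      have hb := hall v hm
      unfold pvDomInt at hb
      simp only [decide_eq_true_eq] at hb
      simp only [List.getD, hv, Option.getD_some]
      exact hb
  exact ⟨(hbnd 1).1, (hbnd 1).2, (hbnd 2).1, (hbnd 2).2, (hbnd 3).1, (hbnd 3).2⟩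

theorem pvEnc_lt_iff (a b : List Int) (ha : pvBnd a) (hb : pvBnd b) :
    pvEnc a < pvEnc b ↔
      (a.getD 3 0 < b.getD 3 0 ∨ (a.getD 3 0 = b.getD 3 0 ∧
        (a.getD 1 0 < b.getD 1 0 ∨ (a.getD 1 0 = b.getD 1 0 ∧ a.getD 2 0 < b.getD 2 0)))) := by
  unfold pvBnd at ha hb
  unfold pvEnc
  omega

theorem pvEnc_inj (a b : List Int) (ha : pvBnd a) (hb : pvBnd b) :
    pvEnc a = pvEnc b ↔
      (a.getD 3 0 = b.getD 3 0 ∧ a.getD 1 0 = b.getD 1 0 ∧ a.getD 2 0 = b.getD 2 0) := by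
  unfold pvBnd at ha hb
  unfold pvEnc
  omega

-- Python's lexicographic tuple '<' is the order of the packed integers (on bounded rows)
theorem pvLt_bridge (a b : List Int) (ha : pvBnd a) (hb : pvBnd b) :
    pyTupleLt3 (pyKey a) (pyKey b) = decide (pvEnc a < pvEnc b) := by
  unfold pvBnd at ha hb
  simp only [pyTupleLt3, pyKey, pysem, pvEnc]
  rw [Bool.eq_iff_iff]
  simp only [Bool.or_eq_true, Bool.and_eq_true, decide_eq_true_eq, beq_iff_eq]
  constructor <;> intro h <;> omega

-- B's loop compares like the packed integers (on bounded rows)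
theorem pvFoldB_congr (xs : List (List Int)) :
    ∀ x : List Int, pvBnd x → (∀ r ∈ xs, pvBnd r) →
    xs.foldl (fun best r => if pyTupleLt3 (pyKey r) (pyKey best) then r else best) x
      = xs.foldl (fun best r => if pvEnc r < pvEnc best then r else best) x := by
  induction xs with
  | nil => intro x _ _; rfl
  | cons r t ih =>
    intro x hbx hb
    have hbr := hb r (by simp)
    simp only [List.foldl_cons]
    rw [pvLt_bridge r x hbr hbx]
    by_cases h : pvEnc r < pvEnc x
    · simp only [h, decide_true, if_true]
      exact ih r hbr (fun s hs => hb s (by simp [hs]))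
    · simp only [h, decide_false, if_false]
      exact ih x hbx (fun s hs => hb s (by simp [hs]))

-- A's cascade stages, named
def pvD (l : List (List Int)) : Int := pvMinOf (fun r => r.getD 3 0) l
def pvL1 (l : List (List Int)) : List (List Int) :=
  l.filter (fun r => decide (r.getD 3 0 = pvD l))
def pvR (l : List (List Int)) : Int := pvMinOf (fun r => r.getD 1 0) (pvL1 l)
def pvL2 (l : List (List Int)) : List (List Int) :=
  (pvL1 l).filter (fun r => decide (r.getD 1 0 = pvR l))
def pvC (l : List (List Int)) : Int := pvMinOf (fun r => r.getD 2 0) (pvL2 l)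
def pvL3 (l : List (List Int)) : List (List Int) :=
  (pvL2 l).filter (fun r => decide (r.getD 2 0 = pvC l))

theorem pvL1_ne (l : List (List Int)) (h : l ≠ []) : pvL1 l ≠ [] := by
  obtain ⟨w, hw, hwk⟩ := pvMinOf_attained' (fun r => r.getD 3 0) l h
  exact List.ne_nil_of_mem (List.mem_filter.2 ⟨hw, by simp only [pvD, decide_eq_true_eq]; exact hwk⟩)

theorem pvL2_ne (l : List (List Int)) (h : l ≠ []) : pvL2 l ≠ [] := by
  obtain ⟨w, hw, hwk⟩ := pvMinOf_attained' (fun r => r.getD 1 0) (pvL1 l) (pvL1_ne l h)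
  exact List.ne_nil_of_mem (List.mem_filter.2 ⟨hw, by simp only [pvR, decide_eq_true_eq]; exact hwk⟩)

-- a row is packed-minimal iff it survives A's three cascade stages
theorem pvCascade (l : List (List Int)) (hne : l ≠ []) (hb : ∀ r ∈ l, pvBnd r)
    (r : List Int) (hr : r ∈ l) :
    pvEnc r = pvMinOf pvEnc l ↔
      (r.getD 3 0 = pvD l ∧ r.getD 1 0 = pvR l ∧ r.getD 2 0 = pvC l) := by
  obtain ⟨m, hm, hmE⟩ := pvMinOf_attained' pvEnc l hne
  have hbm := hb m hm
  have hbr := hb r hr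
  have hDdef : pvD l = pvMinOf (fun r => r.getD 3 0) l := rfl
  have hRdef : pvR l = pvMinOf (fun r => r.getD 1 0) (pvL1 l) := rfl
  have hCdef : pvC l = pvMinOf (fun r => r.getD 2 0) (pvL2 l) := rfl
  -- the packed-minimal element m passes all three stages
  have hm3 : m.getD 3 0 = pvD l := by
    have h1 : pvD l ≤ m.getD 3 0 := pvMinOf_le _ l m hm
    by_contra hlt
    obtain ⟨w, hw, hwk⟩ := pvMinOf_attained' (fun r => r.getD 3 0) l hne
    have hlt2 : pvEnc w < pvEnc m := by
      rw [pvEnc_lt_iff w m (hb w hw) hbm]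
      left; omega
    have := pvMinOf_le pvEnc l w hw
    omega
  have hm1' : m ∈ pvL1 l := List.mem_filter.2 ⟨hm, by simp only [decide_eq_true_eq]; exact hm3⟩
  have hm1 : m.getD 1 0 = pvR l := by
    have h1 : pvR l ≤ m.getD 1 0 := pvMinOf_le _ (pvL1 l) m hm1'
    by_contra hlt
    obtain ⟨w, hw, hwk⟩ := pvMinOf_attained' (fun r => r.getD 1 0) (pvL1 l) (pvL1_ne l hne)
    have hw3 : w.getD 3 0 = pvD l := by
      have := (List.mem_filter.1 hw).2
      exact of_decide_eq_true this
    have hlt2 : pvEnc w < pvEnc m := by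
      rw [pvEnc_lt_iff w m (hb w (List.mem_of_mem_filter hw)) hbm]
      right; exact ⟨by omega, by left; omega⟩
    have := pvMinOf_le pvEnc l w (List.mem_of_mem_filter hw)
    omega
  have hm2' : m ∈ pvL2 l := List.mem_filter.2 ⟨hm1', by simp only [decide_eq_true_eq]; exact hm1⟩
  have hm2 : m.getD 2 0 = pvC l := by
    have h1 : pvC l ≤ m.getD 2 0 := pvMinOf_le _ (pvL2 l) m hm2'
    by_contra hlt
    obtain ⟨w, hw, hwk⟩ := pvMinOf_attained' (fun r => r.getD 2 0) (pvL2 l) (pvL2_ne l hne)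
    have hw1 : w.getD 1 0 = pvR l := by
      have := (List.mem_filter.1 hw).2
      exact of_decide_eq_true this
    have hw3 : w.getD 3 0 = pvD l := by
      have := (List.mem_filter.1 (List.mem_of_mem_filter hw)).2
      exact of_decide_eq_true this
    have hwl : w ∈ l := List.mem_of_mem_filter (List.mem_of_mem_filter hw)
    have hlt2 : pvEnc w < pvEnc m := by
      rw [pvEnc_lt_iff w m (hb w hwl) hbm]
      right; exact ⟨by omega, by right; exact ⟨by omega, by omega⟩⟩
    have := pvMinOf_le pvEnc l w hwl
    omega
  constructor
  · intro hE
    have := (pvEnc_inj r m hbr hbm).1 (by omega)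
    exact ⟨by omega, by omega, by omega⟩
  · intro ⟨e3, e1, e2⟩
    have : pvEnc r = pvEnc m := (pvEnc_inj r m hbr hbm).2 ⟨by omega, by omega, by omega⟩
    omega

-- the packed-min filter is exactly A's triple cascade filter
theorem pvFilterEnc (l : List (List Int)) (hne : l ≠ []) (hb : ∀ r ∈ l, pvBnd r) :
    l.filter (fun r => decide (pvEnc r = pvMinOf pvEnc l)) = pvL3 l := by
  unfold pvL3 pvL2 pvL1
  rw [List.filter_filter, List.filter_filter]
  apply List.filter_congr
  intro r hr
  have hiff := pvCascade l hne hb r hr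
  rw [Bool.eq_iff_iff]
  simp only [Bool.and_eq_true, decide_eq_true_eq]
  tauto

theorem pvSentinel {α : Type} (k : α → Int) (x : α) (xs : List α)
    (hx : k x < 1000000000) :
    (x :: xs).foldl (fun m r => if k r < m then k r else m) 1000000000
      = pvMinOf k (x :: xs) := by
  have hf : (fun m r => if k r < m then k r else m) = (fun m (r : α) => min m (k r)) := by
    funext m r
    rw [min_def]
    split_ifs <;> omega
  rw [hf]
  simp only [List.foldl_cons, pvMinOf]
  congr 1
  omega

theorem pvL3_of_L2_single (l : List (List Int)) (a : List Int) (h : pvL2 l = [a]) :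
    pvL3 l = [a] := by
  have hC : pvC l = a.getD 2 0 := by
    unfold pvC
    rw [h]
    rfl
  unfold pvL3
  rw [h, hC]
  simp

theorem pvL3_of_L1_single (l : List (List Int)) (a : List Int) (h : pvL1 l = [a]) :
    pvL3 l = [a] := by
  have hR : pvR l = a.getD 1 0 := by
    unfold pvR
    rw [h]
    rfl
  apply pvL3_of_L2_single
  unfold pvL2
  rw [h, hR]
  simp

-- A computes the head of the triple cascade filter
theorem pvA_eq (x : List Int) (xs : List (List Int))
    (hpre : ∀ r ∈ x :: xs, r.getD 1 0 < 1000000000 ∧ r.getD 2 0 < 1000000000 ∧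
      r.getD 3 0 < 1000000000) :
    selectTaxi (x :: xs) = (pvL3 (x :: xs)).headD [] := by
  have hx3 : x.getD 3 0 < 1000000000 := (hpre x (by simp)).2.2
  unfold selectTaxi
  simp only [pysem, List.map_id', List.nil_append]
  have e1 : (x :: xs).foldl (fun m r => if r.getD 3 0 < m then r.getD 3 0 else m) 1000000000
      = pvD (x :: xs) := pvSentinel _ x xs hx3
  rw [e1]
  have e2 : List.filter (fun r => decide (r.getD 3 0 = pvD (x :: xs))) (x :: xs)
      = pvL1 (x :: xs) := rfl
  rw [e2]
  have hL1ne : pvL1 (x :: xs) ≠ [] := pvL1_ne _ (List.cons_ne_nil x xs)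
  have hL2ne : pvL2 (x :: xs) ≠ [] := pvL2_ne _ (List.cons_ne_nil x xs)
  have e3 : List.foldl (fun m r => if r.getD 1 0 < m then r.getD 1 0 else m) 1000000000
      (pvL1 (x :: xs)) = pvR (x :: xs) := by
    rcases hc : pvL1 (x :: xs) with _ | ⟨a, t⟩
    · exact absurd hc hL1ne
    · have ha : a ∈ pvL1 (x :: xs) := by rw [hc]; simp
      have hal : a ∈ x :: xs := List.mem_of_mem_filter ha
      have hb1 : a.getD 1 0 < 1000000000 := (hpre a hal).1
      unfold pvR
      rw [hc]
      exact pvSentinel _ a t hb1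
  rw [e3]
  have e4 : List.filter (fun r => decide (pvR (x :: xs) = r.getD 1 0)) (pvL1 (x :: xs))
      = pvL2 (x :: xs) := by
    unfold pvL2
    apply List.filter_congr
    intro r _
    simp [eq_comm]
  rw [e4]
  have e5 : List.foldl (fun m r => if r.getD 2 0 < m then r.getD 2 0 else m) 1000000000
      (pvL2 (x :: xs)) = pvC (x :: xs) := by
    rcases hc : pvL2 (x :: xs) with _ | ⟨a, t⟩
    · exact absurd hc hL2ne
    · have ha : a ∈ pvL2 (x :: xs) := by rw [hc]; simp
      have hal : a ∈ x :: xs := List.mem_of_mem_filter (List.mem_of_mem_filter ha)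
      have hb2 : a.getD 2 0 < 1000000000 := (hpre a hal).2.1
      unfold pvC
      rw [hc]
      exact pvSentinel _ a t hb2
  rw [e5]
  have e6 : List.filter (fun r => decide (pvC (x :: xs) = r.getD 2 0)) (pvL2 (x :: xs))
      = pvL3 (x :: xs) := by
    unfold pvL3
    apply List.filter_congr
    intro r _
    simp [eq_comm]
  rw [e6]
  -- branch logic: every branch A takes returns the head of the full cascade
  by_cases h1 : (pvL1 (x :: xs)).length = 1
  · rw [if_pos h1]
    obtain ⟨a, ha⟩ := List.length_eq_one_iff.1 h1
    rw [pvL3_of_L1_single _ a ha, ha]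
  · rw [if_neg h1]
    have h2 : 2 ≤ (pvL1 (x :: xs)).length := by
      have := List.length_pos_iff.2 hL1ne
      omega
    rw [if_pos h2]
    by_cases h3 : (pvL2 (x :: xs)).length = 1
    · rw [if_pos h3]
      obtain ⟨a, ha⟩ := List.length_eq_one_iff.1 h3
      rw [pvL3_of_L2_single _ a ha, ha]
    · rw [if_neg h3]
      have h4 : 2 ≤ (pvL2 (x :: xs)).length := by
        have := List.length_pos_iff.2 hL2ne
        omega
      rw [if_pos h4]

-- ===== VERDICT (by name: the statement is the Claim_ definition above) =====
theorem selectTaxi_spec : Claim_equal_selectTaxi := by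
  unfold Claim_equal_selectTaxi
  intro l hdom hpre
  unfold Spec_selectTaxi
  obtain ⟨hne, hrows⟩ := hpre
  rcases l with _ | ⟨x, xs⟩
  · exact absurd rfl hne
  have hb : ∀ r ∈ x :: xs, pvBnd r := fun r hr => pvBnd_of_dom _ hdom r hr
  have hpre' : ∀ r ∈ x :: xs, r.getD 1 0 < 1000000000 ∧ r.getD 2 0 < 1000000000 ∧
      r.getD 3 0 < 1000000000 :=
    fun r hr => ⟨(hrows r hr).2.1, (hrows r hr).2.2.1, (hrows r hr).2.2.2⟩
  have hA := pvA_eq x xs hpre'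
  have hBc : selectTaxi_alt (x :: xs)
      = xs.foldl (fun b r => if pvEnc r < pvEnc b then r else b) x := by
    unfold selectTaxi_alt
    exact pvFoldB_congr xs x (hb x (by simp)) (fun r hr => hb r (by simp [hr]))
  have hpick := pvPick_head? pvEnc x xs
  rw [pvFilterEnc (x :: xs) hne hb] at hpick
  rcases hc : pvL3 (x :: xs) with _ | ⟨b, bs⟩
  · rw [hc] at hpick
    simp at hpick
  · rw [hc] at hpick
    simp only [List.head?_cons, Option.some.injEq] at hpick
    rw [hA, hc]
    show b = selectTaxi_alt (x :: xs)
    rw [hBc, ← hpick]
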